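-- pv_equiv track=rewrite | github.com/kmiikki/rpi-camera | python/awbgains-plotter.py | generate_xlist
-- ===== SOURCE A (Python) =====
-- def generate_xlist(number):
--     n=int(number)
--     xlist=[]
--     if number<=10:
--         xlist=list(range(0,n+1))
--     elif number<=50:
--         i=n
--         while i % 5 != 0:
--             i+=1
--         xlist=list(range(0,i+1,5))
--     elif number<=100:
--         i=n
--         while i % 10 != 0:
--             i+=1
--         xlist=list(range(0,i+1,10))
--     return xlist[1:]
-- ===== SOURCE B (Python) =====
-- def generate_xlist(number):
--     if number > 100:
--         return []
--     step = 1 if number <= 10 else (5 if number <= 50 else 10)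
--     n = int(number)
--     out = []
--     t = n + (-n) % step   # top tick: n rounded up to a multiple of step
--     while t >= step:
--         out.append(t)
--         t -= step
--     out.reverse()
--     return out
-- ===== Notes on version B (the rewrite author's own statement) =====
-- stated objective: alternative
-- what changed: Instead of three per-branch range() constructions with while-rounding loops and a [1:] slice, B picks the step once, then builds the tick list back-to-front with a single descending loop from the rounded top tick and reverses it; no range(), no slicing, no leading 0.
import Mathlib
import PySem

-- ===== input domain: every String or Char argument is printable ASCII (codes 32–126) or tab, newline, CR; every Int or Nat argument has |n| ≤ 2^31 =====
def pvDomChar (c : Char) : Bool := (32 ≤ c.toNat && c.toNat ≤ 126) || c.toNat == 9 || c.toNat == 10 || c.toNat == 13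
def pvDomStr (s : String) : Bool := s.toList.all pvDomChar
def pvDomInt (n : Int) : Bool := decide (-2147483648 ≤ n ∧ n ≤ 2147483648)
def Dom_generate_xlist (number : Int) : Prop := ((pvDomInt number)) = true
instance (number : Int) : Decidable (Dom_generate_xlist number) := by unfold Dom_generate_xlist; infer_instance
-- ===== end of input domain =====

-- B replaces the three per-branch range()+while-rounding+[1:]-slice constructions with one
-- unified step selection and a single descending loop building the ticks back-to-front, then a reverse (alternative decomposition).


-- ===== PORT A =====
-- while i % 5 != 0: i += 1   — fuel-based: ((5 - i%5) % 5) + 1 steps always suffice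
def pvRound5Go : Nat → Int → Int
  | 0, i => i
  | fuel + 1, i => if PySem.Int.mod i 5 ≠ 0 then pvRound5Go fuel (i + 1) else i

def pvRound5 (i : Int) : Int := pvRound5Go (((5 - PySem.Int.mod i 5) % 5).toNat + 1) i

-- while i % 10 != 0: i += 1
def pvRound10Go : Nat → Int → Int
  | 0, i => i
  | fuel + 1, i => if PySem.Int.mod i 10 ≠ 0 then pvRound10Go fuel (i + 1) else i

def pvRound10 (i : Int) : Int := pvRound10Go (((10 - PySem.Int.mod i 10) % 10).toNat + 1) i

def generate_xlist (number : Int) : List Int :=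
  let n := number                                   -- int(number) on an int
  let xlist : List Int :=
    if number ≤ 10 then PySem.List.pyRange 0 (n + 1) 1
    else if number ≤ 50 then
      let i := pvRound5 n
      PySem.List.pyRange 0 (i + 1) 5
    else if number ≤ 100 then
      let i := pvRound10 n
      PySem.List.pyRange 0 (i + 1) 10
    else []
  PySem.List.slice xlist (some 1) none              -- xlist[1:]

-- ===== PORT B =====
-- while t >= step: out.append(t); t -= step   — fuel-based: t.toNat steps always suffice (step ≥ 1)
def pvCollect (step : Int) : Nat → Int → List Int → List Int
  | 0, _, out => out
  | fuel + 1, t, out => if t ≥ step then pvCollect step fuel (t - step) (out ++ [t]) else out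

def generate_xlist_alt (number : Int) : List Int :=
  if 100 < number then []
  else
    let step : Int := if number ≤ 10 then 1 else if number ≤ 50 then 5 else 10
    let n := number                                 -- int(number) on an int
    let t := n + PySem.Int.mod (-n) step            -- top tick: n rounded up to a multiple of step
    (pvCollect step t.toNat t []).reverse

-- ===== PRECONDITION & SPEC =====
def Spec_generate_xlist (number : Int) (out : List Int) : Prop := out = generate_xlist_alt number
instance (number : Int) (out : List Int) : Decidable (Spec_generate_xlist number out) := by unfold Spec_generate_xlist; infer_instance

-- ===== CLAIM (what is proved, stated in full; the proofs are below) =====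
def Claim_equal_generate_xlist : Prop := ∀ (number : Int), Dom_generate_xlist number → Spec_generate_xlist number (generate_xlist number)

-- ===== LEMMAS AND PROOFS =====

-- the while loop of A computes i plus the distance to the next multiple (Int.emod form)
theorem pvRound5Go_closed (fuel : Nat) (i : Int) (h : ((5 - i % 5) % 5).toNat ≤ fuel) :
    pvRound5Go fuel i = i + (5 - i % 5) % 5 := by
  induction fuel generalizing i with
  | zero => simp only [pvRound5Go]; omega
  | succ f ih =>
    simp only [pvRound5Go]
    rw [PySem.Int.mod_eq_emod_of_pos (by norm_num : (0:Int) < 5)]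
    split_ifs with hm
    · rw [ih (i + 1) (by omega)]
      omega
    · omega

theorem pvRound5_closed (n : Int) : pvRound5 n = n + (5 - n % 5) % 5 := by
  unfold pvRound5
  rw [PySem.Int.mod_eq_emod_of_pos (by norm_num : (0:Int) < 5)]
  exact pvRound5Go_closed _ n (by omega)

theorem pvRound10Go_closed (fuel : Nat) (i : Int) (h : ((10 - i % 10) % 10).toNat ≤ fuel) :
    pvRound10Go fuel i = i + (10 - i % 10) % 10 := by
  induction fuel generalizing i with
  | zero => simp only [pvRound10Go]; omega
  | succ f ih =>
    simp only [pvRound10Go]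
    rw [PySem.Int.mod_eq_emod_of_pos (by norm_num : (0:Int) < 10)]
    split_ifs with hm
    · rw [ih (i + 1) (by omega)]
      omega
    · omega

theorem pvRound10_closed (n : Int) : pvRound10 n = n + (10 - n % 10) % 10 := by
  unfold pvRound10
  rw [PySem.Int.mod_eq_emod_of_pos (by norm_num : (0:Int) < 10)]
  exact pvRound10Go_closed _ n (by omega)

-- dropping range(0, m*s+1, s)'s head 0 yields range(s, m*s+1, s)
theorem tick_tail (m s : Int) (hs : 0 < s) (hm : 0 ≤ m) :
    (PySem.List.pyRange 0 (m*s+1) s).tail = PySem.List.pyRange s (m*s+1) s := by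
  rw [PySem.List.pyRange_of_pos _ _ hs, PySem.List.pyRange_of_pos _ _ hs]
  rcases Int.lt_or_le 0 m with hm1 | hm0
  · have h1 : (0:Int) < m*s+1 := by nlinarith
    have h2 : s < m*s+1 := by nlinarith
    rw [if_pos h1, if_pos h2]
    have e1 : ((m*s+1 - 0 + s - 1)/s).toNat = m.toNat + 1 := by
      have : m*s+1-0+s-1 = (m+1)*s := by ring
      rw [this, Int.mul_ediv_cancel _ (by omega)]
      omega
    have e2 : ((m*s+1 - s + s - 1)/s).toNat = m.toNat := by
      have : m*s+1-s+s-1 = m*s := by ring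
      rw [this, Int.mul_ediv_cancel _ (by omega)]
    rw [e1, e2, List.range_succ_eq_map]
    simp only [List.map_cons, List.tail_cons, List.map_map]
    apply List.map_congr_left
    intro k _
    simp [Function.comp]
    ring
  · have hm' : m = 0 := le_antisymm hm0 hm
    subst hm'
    simp only [zero_mul, zero_add]
    rw [if_pos (by norm_num), if_neg (by omega)]
    have : ((1 - 0 + s - 1)/s).toNat = 1 := by
      have : (1:Int) - 0 + s - 1 = s := by ring
      rw [this, Int.ediv_self (by omega)]
      rfl
    rw [this]
    rfl

theorem branchA1 (n : Int) :
    PySem.List.slice (PySem.List.pyRange 0 (n + 1) 1) (some 1) none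
      = PySem.List.pyRange 1 (n + 1) 1 := by
  rw [PySem.List.slice_from_one]
  by_cases hp : 0 < n + 1
  · rw [PySem.List.pyRange_one_cons (by omega)]
    rfl
  · rw [PySem.List.pyRange_one_eq_nil (by omega), PySem.List.pyRange_one_eq_nil (by omega)]
    rfl

-- B's loop never runs when the start is below the step
theorem collect_stop (s : Int) (fuel : Nat) (t : Int) (out : List Int) (h : t < s) :
    pvCollect s fuel t out = out := by
  cases fuel with
  | zero => rfl
  | succ f => simp [pvCollect, not_le.mpr h]

-- B's loop, started at m*s, appends m*s, (m-1)*s, …, s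
theorem collect_acc (s : Int) (hs : 0 < s) (m : Nat) :
    ∀ (fuel : Nat) (out : List Int), m ≤ fuel →
      pvCollect s fuel ((m:Int)*s) out
        = out ++ ((List.range m).map (fun k : Nat => s + s * (k:Int))).reverse := by
  induction m with
  | zero => intro fuel out _; rw [collect_stop s fuel _ out (by omega)]; simp
  | succ p ih =>
    intro fuel out hf
    cases fuel with
    | zero => omega
    | succ f =>
      have hge : ((p:Nat)+1:Int)*s ≥ s := by
        have : (0:Int) ≤ (p:Int)*s := by positivity
        nlinarith
      simp only [pvCollect]
      rw [if_pos (by push_cast; linarith)]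
      have harg : ((p+1:Nat):Int)*s - s = (p:Int)*s := by push_cast; ring
      rw [harg, ih f (out ++ [((p+1:Nat):Int)*s]) (by omega)]
      rw [List.range_succ]
      simp only [List.map_append, List.map_cons, List.map_nil, List.reverse_append,
        List.reverse_cons, List.reverse_nil, List.nil_append, List.append_assoc]
      congr 2
      push_cast
      ring

-- the collected descending list, reversed, is exactly range(s, m*s+1, s)
theorem collect_eq_pyRange (s : Int) (hs : 0 < s) (m : Nat) :
    (pvCollect s ((m:Int)*s).toNat ((m:Int)*s) []).reverse
      = PySem.List.pyRange s ((m:Int)*s+1) s := by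
  have hfuel : m ≤ ((m:Int)*s).toNat := by
    have : (m:Int) ≤ (m:Int)*s := le_mul_of_one_le_right (by positivity) (by omega)
    omega
  rw [collect_acc s hs m _ [] hfuel]
  simp only [List.nil_append, List.reverse_reverse]
  rw [PySem.List.pyRange_of_pos _ _ hs]
  have hcount : (if s < (m:Int)*s+1 then (((m:Int)*s+1 - s + s - 1)/s).toNat else 0) = m := by
    rcases Nat.eq_zero_or_pos m with h0 | h1
    · subst h0; rw [if_neg (by omega)]
    · have hlt : s < (m:Int)*s+1 := by
        have : (1:Int)*s ≤ (m:Int)*s := by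
          apply mul_le_mul_of_nonneg_right _ (by omega)
          exact_mod_cast h1
        omega
      rw [if_pos hlt]
      have : (m:Int)*s+1 - s + s - 1 = (m:Int)*s := by ring
      rw [this, Int.mul_ediv_cancel _ (by omega)]
      omega
  rw [hcount]

-- ===== VERDICT (by name: the statement is the Claim_ definition above) =====
theorem generate_xlist_spec : Claim_equal_generate_xlist := by
  intro number _
  unfold Spec_generate_xlist generate_xlist generate_xlist_alt
  by_cases h10 : number ≤ 10
  · simp only [h10, if_pos, if_neg (by omega : ¬ (100:Int) < number)]
    rw [branchA1 number]
    rw [PySem.Int.mod_eq_emod_of_pos (by norm_num : (0:Int) < 1)]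
    have ht : number + -number % 1 = number := by omega
    rw [ht]
    rcases Int.lt_or_le 0 number with hn | hn
    · have hm : ((number.toNat : Int)) * 1 = number := by omega
      have := collect_eq_pyRange 1 (by norm_num) number.toNat
      rw [hm] at this
      rw [this]
    · rw [collect_stop 1 _ _ _ (by omega)]
      rw [PySem.List.pyRange_one_eq_nil (by omega)]
      rfl
  · by_cases h50 : number ≤ 50
    · simp only [h10, h50, if_neg (by omega : ¬ (100:Int) < number), if_false, if_pos]
      rw [PySem.List.slice_from_one, PySem.Int.mod_eq_emod_of_pos (by norm_num : (0:Int) < 5)]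
      have hc := pvRound5_closed number
      set i := pvRound5 number with hi
      have ht : number + -number % 5 = i := by omega
      rw [ht]
      have hipos : 0 ≤ i ∧ i % 5 = 0 ∧ 5 ≤ i := by omega
      have hm : ((i/5).toNat : Int) * 5 = i := by omega
      have h1 := tick_tail ((i/5).toNat : Int) 5 (by norm_num) (by positivity)
      have h2 := collect_eq_pyRange 5 (by norm_num) (i/5).toNat
      rw [hm] at h1 h2
      rw [h1, h2]
    · by_cases h100 : number ≤ 100
      · simp only [h10, h50, h100, if_neg (by omega : ¬ (100:Int) < number), if_false, if_pos]
        rw [PySem.List.slice_from_one, PySem.Int.mod_eq_emod_of_pos (by norm_num : (0:Int) < 10)]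
        have hc := pvRound10_closed number
        set i := pvRound10 number with hi
        have ht : number + -number % 10 = i := by omega
        rw [ht]
        have hipos : 0 ≤ i ∧ i % 10 = 0 ∧ 10 ≤ i := by omega
        have hm : ((i/10).toNat : Int) * 10 = i := by omega
        have h1 := tick_tail ((i/10).toNat : Int) 10 (by norm_num) (by positivity)
        have h2 := collect_eq_pyRange 10 (by norm_num) (i/10).toNat
        rw [hm] at h1 h2
        rw [h1, h2]
      · simp [h10, h50, h100, PySem.List.slice, show (100:Int) < number by omega]
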